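-- pv_equiv track=rewrite | github.com/Artuomka/python_courses | hw_10/hw_10_2/main.py | first_word
-- ===== SOURCE A (Python) =====
-- def first_word(text):
--     filtered_text = text.replace(".", " ")
--     filtered_text = filtered_text.replace(",", " ")
--     words = filtered_text.split(" ")
--     for word in words:
--         if word:
--             return word
--
--     return None
-- ===== SOURCE B (Python) =====
-- def first_word(text):
--     seps = " .,"
--     it = iter(text)
--     # skip leading separators; the first non-separator character starts the word
--     for ch in it:
--         if ch not in seps:
--             word = [ch]
--             break
--     else:
--         return None
--     # accumulate the rest of the word
--     for ch in it:
--         if ch in seps: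
--             break
--         word.append(ch)
--     return "".join(word)
-- ===== Notes on version B (the rewrite author's own statement) =====
-- stated objective: alternative
-- what changed: Replaces A's replace-replace-split pipeline (which builds intermediate copies of the whole string and a word list) by a single left-to-right scan that skips leading separators and accumulates the first word; it trades A's C-level bulk string ops for one explicit pass.
import Mathlib
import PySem

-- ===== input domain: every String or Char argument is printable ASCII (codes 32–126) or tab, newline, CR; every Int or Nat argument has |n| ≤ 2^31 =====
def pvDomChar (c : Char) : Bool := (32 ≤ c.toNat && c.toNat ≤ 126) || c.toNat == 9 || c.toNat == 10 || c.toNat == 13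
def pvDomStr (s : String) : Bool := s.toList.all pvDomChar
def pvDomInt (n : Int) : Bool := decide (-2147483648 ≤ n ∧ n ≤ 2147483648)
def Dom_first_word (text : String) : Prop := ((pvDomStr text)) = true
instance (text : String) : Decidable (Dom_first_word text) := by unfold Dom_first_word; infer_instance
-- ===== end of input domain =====

-- B replaces A's replace-replace-split pipeline by a single left-to-right scan that skips
-- leading separators and accumulates the first word (alternative decomposition, same cost).

-- ===== PORT A =====
-- the 'for word in words: if word: return word' loop
def pvFirstNonempty : List String → Option String
  | [] => none
  | w :: ws => if w ≠ "" then some w else pvFirstNonempty ws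

def first_word (text : String) : Option String :=
  let filtered_text := PySem.Str.replace text "." " "
  let filtered_text := PySem.Str.replace filtered_text "," " "
  let words := (PySem.Str.split? filtered_text " ").getD []   -- sep ≠ "", so split? is some
  pvFirstNonempty words

-- ===== PORT B =====
def pvIsSep (c : Char) : Bool := c == ' ' || c == '.' || c == ','

-- the second 'for ch in it' loop: append chars until a separator (or the end)
def pvTakeWord : List Char → List Char → List Char
  | [], word => word
  | c :: cs, word => if pvIsSep c then word else pvTakeWord cs (word ++ [c])

-- the first 'for ch in it' loop with its 'else: return None'
def pvScan : List Char → Option String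
  | [] => none
  | c :: cs => if !pvIsSep c then some (String.ofList (pvTakeWord cs [c])) else pvScan cs

def first_word_alt (text : String) : Option String :=
  pvScan text.toList

-- ===== PRECONDITION & SPEC =====
def Spec_first_word (text : String) (out : Option String) : Prop := out = first_word_alt text
instance (text : String) (out : Option String) : Decidable (Spec_first_word text out) := by unfold Spec_first_word; infer_instance

-- ===== CLAIM (what is proved, stated in full; the proofs are below) =====
def Claim_equal_first_word : Prop := ∀ (text : String), Dom_first_word text → Spec_first_word text (first_word text)

-- ===== LEMMAS AND PROOFS =====

-- the combined effect of the two single-character replaces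
def pvG (c : Char) : Char :=
  if (if c = '.' then ' ' else c) = ',' then ' ' else (if c = '.' then ' ' else c)

-- Chars.replace with a single-char pattern is a map
theorem pv_replace_go_single (o n : Char) :
    ∀ (s : List Char) (fuel : Nat) (acc : List Char), s.length ≤ fuel →
      PySem.Chars.replace.go [o] [n] fuel s acc
        = acc.reverse ++ s.map (fun c => if c = o then n else c) := by
  intro s
  induction s with
  | nil =>
      intro fuel acc _
      cases fuel <;> simp [PySem.Chars.replace.go]
  | cons c t ih =>
      intro fuel acc h
      cases fuel with
      | zero => simp at h
      | succ f =>
          have h' : t.length ≤ f := by simpa using h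
          by_cases hc : o = c
          · subst hc
            simp [PySem.Chars.replace.go, List.isPrefixOf, ih f (n :: acc) h']
          · simp [PySem.Chars.replace.go, List.isPrefixOf, hc, Ne.symm hc, ih f (c :: acc) h']

theorem pv_replace_single (s : List Char) (o n : Char) :
    PySem.Chars.replace s [o] [n] = s.map (fun c => if c = o then n else c) := by
  simp [PySem.Chars.replace, pv_replace_go_single o n s s.length [] (le_refl _)]

-- splitOn with a single-char separator, in direct recursive form
def pvSplitC (sep : Char) : List Char → List Char → List (List Char)
  | [], cur => [cur.reverse]
  | x :: xs, cur => if x = sep then cur.reverse :: pvSplitC sep xs [] else pvSplitC sep xs (x :: cur)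

theorem pv_splitOn_go_single (sep : Char) :
    ∀ (s : List Char) (fuel : Nat) (cur : List Char) (acc : List (List Char)),
      s.length < fuel →
      PySem.Chars.splitOn.go [sep] fuel s cur acc = acc.reverse ++ pvSplitC sep s cur := by
  intro s
  induction s with
  | nil =>
      intro fuel cur acc h
      cases fuel with
      | zero => omega
      | succ f => simp [PySem.Chars.splitOn.go, pvSplitC]
  | cons x xs ih =>
      intro fuel cur acc h
      cases fuel with
      | zero => omega
      | succ f =>
          have h' : xs.length < f := by simpa using h
          by_cases hx : x = sep
          · subst hx
            simp [PySem.Chars.splitOn.go, List.isPrefixOf, pvSplitC,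
              ih f [] (cur.reverse :: acc) h']
          · simp [PySem.Chars.splitOn.go, List.isPrefixOf, hx, Ne.symm hx, pvSplitC,
              ih f (x :: cur) acc h']

theorem pv_splitOn_single (s : List Char) (sep : Char) :
    PySem.Chars.splitOn s [sep] = pvSplitC sep s [] := by
  simpa using pv_splitOn_go_single sep s (s.length + 1) [] [] (by omega)

-- first-nonempty over char lists
def pvFirstNEC : List (List Char) → Option (List Char)
  | [] => none
  | w :: ws => if w ≠ [] then some w else pvFirstNEC ws

theorem pv_firstNonempty_map (ws : List (List Char)) :
    pvFirstNonempty (ws.map String.ofList) = (pvFirstNEC ws).map String.ofList := by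
  induction ws with
  | nil => simp [pvFirstNonempty, pvFirstNEC]
  | cons w ws ih =>
      by_cases hw : w = []
      · simp [pvFirstNonempty, pvFirstNEC, hw, ih]
      · simp [pvFirstNonempty, pvFirstNEC, hw]

theorem pv_firstNEC_splitC_ne (m : List Char) :
    ∀ cur : List Char, cur ≠ [] →
      pvFirstNEC (pvSplitC ' ' m cur) = some (cur.reverse ++ m.takeWhile (fun c => c != ' ')) := by
  induction m with
  | nil => intro cur hcur; simp [pvSplitC, pvFirstNEC, hcur]
  | cons x xs ih =>
      intro cur hcur
      by_cases hx : x = ' '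
      · simp [pvSplitC, pvFirstNEC, hx, hcur]
      · simp [pvSplitC, hx, ih (x :: cur) (by simp)]

theorem pv_firstNEC_splitC (m : List Char) :
    pvFirstNEC (pvSplitC ' ' m [])
      = if m.dropWhile (fun c => c == ' ') = [] then none
        else some ((m.dropWhile (fun c => c == ' ')).takeWhile (fun c => c != ' ')) := by
  induction m with
  | nil => simp [pvSplitC, pvFirstNEC]
  | cons x xs ih =>
      by_cases hx : x = ' '
      · simpa [pvSplitC, pvFirstNEC, hx] using ih
      · simp [pvSplitC, hx, pv_firstNEC_splitC_ne xs [x] (by simp)]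

-- pvG sends exactly the separator characters to ' '
theorem pv_g_sep (c : Char) (h : pvIsSep c = true) : pvG c = ' ' := by
  have h' : c = ' ' ∨ c = '.' ∨ c = ',' := by simpa [pvIsSep, or_assoc] using h
  rcases h' with h' | h' | h' <;> subst h' <;> decide

theorem pv_g_not_sep (c : Char) (h : pvIsSep c = false) : pvG c = c ∧ c ≠ ' ' := by
  have h' : ¬ c = ' ' ∧ ¬ c = '.' ∧ ¬ c = ',' := by simpa [pvIsSep, and_assoc] using h
  obtain ⟨h1, h2, h3⟩ := h'
  exact ⟨by simp [pvG, h2, h3], h1⟩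

theorem pv_takeWord_eq (cs : List Char) :
    ∀ word, pvTakeWord cs word = word ++ cs.takeWhile (fun c => !pvIsSep c) := by
  induction cs with
  | nil => intro word; simp [pvTakeWord]
  | cons c cs ih =>
      intro word
      by_cases hc : pvIsSep c
      · simp [pvTakeWord, hc]
      · simp [pvTakeWord, hc, ih]

theorem pv_takeWhile_map (cs : List Char) :
    (cs.map pvG).takeWhile (fun c => c != ' ') = cs.takeWhile (fun c => !pvIsSep c) := by
  induction cs with
  | nil => simp
  | cons c cs ih =>
      by_cases hc : pvIsSep c
      · simp [pv_g_sep c hc, hc]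
      · obtain ⟨hg, hne⟩ := pv_g_not_sep c (by simpa using hc)
        simp [hg, hne, hc, ih]

theorem pv_scan_eq (l : List Char) :
    pvScan l
      = Option.map String.ofList
          (if (l.map pvG).dropWhile (fun c => c == ' ') = [] then none
           else some (((l.map pvG).dropWhile (fun c => c == ' ')).takeWhile (fun c => c != ' '))) := by
  induction l with
  | nil => simp [pvScan]
  | cons c cs ih =>
      by_cases hc : pvIsSep c
      · simpa [pvScan, hc, List.dropWhile_cons, pv_g_sep c hc] using ih
      · obtain ⟨hg, hne⟩ := pv_g_not_sep c (by simpa using hc)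
        simp [pvScan, hc, hg, hne, pv_takeWord_eq cs [c], pv_takeWhile_map]

theorem pv_filtered_toList (text : String) :
    (PySem.Str.replace (PySem.Str.replace text "." " ") "," " ").toList
      = text.toList.map pvG := by
  have h1 : (".".toList) = ['.'] := by decide
  have h2 : (",".toList) = [','] := by decide
  have h3 : (" ".toList) = [' '] := by decide
  simp only [PySem.Str.toList_replace, h1, h2, h3, pv_replace_single, List.map_map]
  rfl

-- ===== VERDICT (by name: the statement is the Claim_ definition above) =====
theorem first_word_spec : Claim_equal_first_word := by
  intro text _
  unfold Spec_first_word first_word first_word_alt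
  simp only [PySem.Str.split?, PySem.Chars.split?]
  have hsep : (" ".toList) = [' '] := by decide
  simp only [hsep, if_neg (by decide : ¬ ([' '] : List Char).isEmpty = true)]
  simp only [Option.map_some, Option.getD_some]
  rw [pv_firstNonempty_map, pv_filtered_toList, pv_splitOn_single, pv_firstNEC_splitC,
    pv_scan_eq]
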